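-- pv_equiv track=rewrite | github.com/luhygenet/hyperon-miner | experiments/rules/conj-exp/main.py | combine_lists_recursive
-- ===== SOURCE A (Python) =====
-- def combine_lists_recursive(list1, list2, length, current_combination=None, index1=0, index2=0):
--     if current_combination is None:
--         current_combination = []
--
--     if len(current_combination) == length:
--         return [current_combination]
--
--     combinations = []
--
--     for i in range(index1, len(list1)):
--         new_combination = current_combination + [list1[i]]
--         combinations.extend(combine_lists_recursive(list1, list2, length, new_combination, i + 1, index2))
--
--     for j in range(index2, len(list2)):
--         new_combination = current_combination + [list2[j]]
--         combinations.extend(combine_lists_recursive(list1, list2, length, new_combination, index1, j + 1))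
--
--     return combinations
-- ===== SOURCE B (Python) =====
-- def combine_lists_recursive(list1, list2, length, current_combination=None, index1=0, index2=0):
--     start = [] if current_combination is None else current_combination
--     stack = [(start, index1, index2)]
--     results = []
--     while stack:
--         comb, i1, i2 = stack.pop()
--         if len(comb) == length:
--             results.append(comb)
--             continue
--         children = [(comb + [list1[i]], i + 1, i2) for i in range(i1, len(list1))]
--         children += [(comb + [list2[j]], i1, j + 1) for j in range(i2, len(list2))]
--         stack.extend(reversed(children))
--     return results
-- ===== Notes on version B (the rewrite author's own statement) =====
-- stated objective: alternative
-- what changed: A's recursion is replaced by an iterative explicit-stack DFS over (combination, index1, index2) states, pushing children in reverse so popping reproduces A's left-to-right pre-order.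
import Mathlib
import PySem

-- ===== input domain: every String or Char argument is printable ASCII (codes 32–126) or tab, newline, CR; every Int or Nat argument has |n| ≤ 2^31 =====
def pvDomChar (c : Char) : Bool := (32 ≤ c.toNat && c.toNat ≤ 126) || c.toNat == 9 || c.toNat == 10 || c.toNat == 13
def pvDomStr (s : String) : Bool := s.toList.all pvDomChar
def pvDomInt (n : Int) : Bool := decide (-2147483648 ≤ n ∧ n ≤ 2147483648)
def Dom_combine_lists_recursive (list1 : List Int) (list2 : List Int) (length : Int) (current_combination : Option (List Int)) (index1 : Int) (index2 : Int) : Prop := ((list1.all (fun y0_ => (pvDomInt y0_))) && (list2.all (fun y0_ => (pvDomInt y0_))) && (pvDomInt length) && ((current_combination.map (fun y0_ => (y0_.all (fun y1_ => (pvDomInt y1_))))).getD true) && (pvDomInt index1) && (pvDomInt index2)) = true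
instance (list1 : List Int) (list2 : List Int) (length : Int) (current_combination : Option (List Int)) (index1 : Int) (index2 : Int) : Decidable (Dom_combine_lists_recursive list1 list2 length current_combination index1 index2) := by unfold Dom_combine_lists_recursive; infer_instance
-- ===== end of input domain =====

-- B replaces A's recursion by an iterative explicit-stack DFS (worklist of (combination, index1, index2) states,
-- children pushed in reverse so popping reproduces A's left-to-right pre-order); objective: alternative decomposition, same cost.
-- In both ports 'fuel' is only a structural totality guard, always called with enough fuel; out-of-range
-- list access (impossible under Pre_) defaults to 0.

-- ===== PORT A =====
-- literal transliteration of A's recursion (fuel bounds the recursion depth: it is the number of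
-- remaining candidate positions plus one, which strictly shrinks at every recursive call)
def pvGoA (list1 list2 : List Int) (length : Int) (fuel : Nat) (c : List Int) (i1 i2 : Int) : List (List Int) :=
  if (c.length : Int) = length then [c]
  else
    match fuel with
    | 0 => []
    | fuel + 1 =>
      let combos1 := (PySem.List.pyRange i1 (list1.length : Int) 1).foldl
        (fun acc i => acc ++ pvGoA list1 list2 length fuel (c ++ [PySem.List.pyGetD list1 i 0]) (i + 1) i2) []
      (PySem.List.pyRange i2 (list2.length : Int) 1).foldl
        (fun acc j => acc ++ pvGoA list1 list2 length fuel (c ++ [PySem.List.pyGetD list2 j 0]) i1 (j + 1)) combos1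

def combine_lists_recursive (list1 : List Int) (list2 : List Int) (length : Int) (current_combination : Option (List Int)) (index1 : Int) (index2 : Int) : List (List Int) :=
  pvGoA list1 list2 length
    (((list1.length : Int) - index1).toNat + ((list2.length : Int) - index2).toNat + 1)
    (current_combination.getD []) index1 index2

-- ===== PORT B =====
-- the children of one popped state, in the order B's DFS visits them (list1 picks first, then list2 picks)
def pvChildren (list1 list2 : List Int) (c : List Int) (i1 i2 : Int) : List (List Int × Int × Int) :=
  (PySem.List.pyRange i1 (list1.length : Int) 1).map (fun i => (c ++ [PySem.List.pyGetD list1 i 0], i + 1, i2))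
  ++ (PySem.List.pyRange i2 (list2.length : Int) 1).map (fun j => (c ++ [PySem.List.pyGetD list2 j 0], i1, j + 1))

-- fuel bound for one stack entry: an upper bound on the number of loop iterations its subtree costs
def pvStackWeight (list1 list2 : List Int) (s : List Int × Int × Int) : Nat :=
  Nat.factorial ((((list1.length : Int) - s.2.1).toNat + ((list2.length : Int) - s.2.2).toNat) + 1)

-- iterative DFS over an explicit stack (head of the list = top of the stack); one fuel unit per iteration
def pvLoop (list1 list2 : List Int) (length : Int) (fuel : Nat) (stack : List (List Int × Int × Int)) (results : List (List Int)) : List (List Int) :=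
  match fuel, stack with
  | _, [] => results
  | 0, _ => results
  | fuel + 1, (c, i1, i2) :: rest =>
    if (c.length : Int) = length then pvLoop list1 list2 length fuel rest (results ++ [c])
    else pvLoop list1 list2 length fuel (pvChildren list1 list2 c i1 i2 ++ rest) results

-- transliteration of B: its Python pushes reversed(children) onto an array stack and pops from the end,
-- which equals prepending the children in order to a head-as-top list stack
def combine_lists_recursive_alt (list1 : List Int) (list2 : List Int) (length : Int) (current_combination : Option (List Int)) (index1 : Int) (index2 : Int) : List (List Int) :=
  pvLoop list1 list2 length
    (pvStackWeight list1 list2 (current_combination.getD [], index1, index2))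
    [(current_combination.getD [], index1, index2)] []

-- ===== PRECONDITION & SPEC =====
-- Pre_ is exactly the no-IndexError set: unless the base case fires immediately, a start index below
-- -len(list) makes Python's list[i] raise IndexError on the very first access (both A and B raise there).
def Pre_combine_lists_recursive (list1 : List Int) (list2 : List Int) (length : Int) (current_combination : Option (List Int)) (index1 : Int) (index2 : Int) : Prop :=
  (((current_combination.getD []).length : Int) = length) ∨
    (-(list1.length : Int) ≤ index1 ∧ -(list2.length : Int) ≤ index2)
instance (list1 : List Int) (list2 : List Int) (length : Int) (current_combination : Option (List Int)) (index1 : Int) (index2 : Int) : Decidable (Pre_combine_lists_recursive list1 list2 length current_combination index1 index2) := by unfold Pre_combine_lists_recursive; infer_instance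

def pvWitness_combine_lists_recursive : List Int × List Int × Int × Option (List Int) × Int × Int := ([1, 2], [3], 2, none, 0, 0)

def Spec_combine_lists_recursive (list1 : List Int) (list2 : List Int) (length : Int) (current_combination : Option (List Int)) (index1 : Int) (index2 : Int) (out : List (List Int)) : Prop := out = combine_lists_recursive_alt list1 list2 length current_combination index1 index2
instance (list1 : List Int) (list2 : List Int) (length : Int) (current_combination : Option (List Int)) (index1 : Int) (index2 : Int) (out : List (List Int)) : Decidable (Spec_combine_lists_recursive list1 list2 length current_combination index1 index2 out) := by unfold Spec_combine_lists_recursive; infer_instance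

-- ===== CLAIM (what is proved, stated in full; the proofs are below) =====
def Claim_equal_combine_lists_recursive : Prop := ∀ (list1 : List Int) (list2 : List Int) (length : Int) (current_combination : Option (List Int)) (index1 : Int) (index2 : Int), Dom_combine_lists_recursive list1 list2 length current_combination index1 index2 → Pre_combine_lists_recursive list1 list2 length current_combination index1 index2 → Spec_combine_lists_recursive list1 list2 length current_combination index1 index2 (combine_lists_recursive list1 list2 length current_combination index1 index2)

-- ===== LEMMAS AND PROOFS =====

-- the remaining-positions measure of a state
def pvM (list1 list2 : List Int) (i1 i2 : Int) : Nat :=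
  ((list1.length : Int) - i1).toNat + ((list2.length : Int) - i2).toNat

-- A's recursion does not depend on the fuel, as long as the fuel exceeds the measure
lemma pvGoA_congr (list1 list2 : List Int) (n : Int) :
    ∀ (f1 f2 : Nat) (c : List Int) (i1 i2 : Int),
      pvM list1 list2 i1 i2 < f1 → pvM list1 list2 i1 i2 < f2 →
      pvGoA list1 list2 n f1 c i1 i2 = pvGoA list1 list2 n f2 c i1 i2 := by
  intro f1
  induction f1 with
  | zero => intro f2 c i1 i2 h1 _; omega
  | succ a ih =>
    intro f2 c i1 i2 h1 h2
    match f2, h2 with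
    | b + 1, _ =>
      rw [pvGoA, pvGoA]
      split_ifs with hbase
      · rfl
      · simp only
        have e1 : ∀ acc, (PySem.List.pyRange i1 (list1.length : Int) 1).foldl
            (fun acc i => acc ++ pvGoA list1 list2 n a (c ++ [PySem.List.pyGetD list1 i 0]) (i + 1) i2) acc
            = (PySem.List.pyRange i1 (list1.length : Int) 1).foldl
            (fun acc i => acc ++ pvGoA list1 list2 n b (c ++ [PySem.List.pyGetD list1 i 0]) (i + 1) i2) acc := by
          intro acc
          apply PySem.List.foldl_congr_mem
          intro acc' i hi
          have hb := PySem.List.mem_pyRange_one.mp hi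
          rw [ih b _ _ _ (by unfold pvM at *; omega) (by unfold pvM at *; omega)]
        have e2 : ∀ acc, (PySem.List.pyRange i2 (list2.length : Int) 1).foldl
            (fun acc j => acc ++ pvGoA list1 list2 n a (c ++ [PySem.List.pyGetD list2 j 0]) i1 (j + 1)) acc
            = (PySem.List.pyRange i2 (list2.length : Int) 1).foldl
            (fun acc j => acc ++ pvGoA list1 list2 n b (c ++ [PySem.List.pyGetD list2 j 0]) i1 (j + 1)) acc := by
          intro acc
          apply PySem.List.foldl_congr_mem
          intro acc' j hj
          have hb := PySem.List.mem_pyRange_one.mp hj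
          rw [ih b _ _ _ (by unfold pvM at *; omega) (by unfold pvM at *; omega)]
        rw [e1, e2]

-- the canonical (fuel-independent) value of A on a state
def pvA (list1 list2 : List Int) (n : Int) (s : List Int × Int × Int) : List (List Int) :=
  pvGoA list1 list2 n (pvM list1 list2 s.2.1 s.2.2 + 1) s.1 s.2.1 s.2.2

-- one unfolding of A's recursion, phrased as a flatMap over B's child list
lemma pvA_flat (list1 list2 : List Int) (n : Int) (c : List Int) (i1 i2 : Int) :
    pvA list1 list2 n (c, i1, i2) =
      if (c.length : Int) = n then [c]
      else (pvChildren list1 list2 c i1 i2).flatMap (pvA list1 list2 n) := by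
  rw [pvA]
  simp only
  rw [pvGoA]
  split_ifs with hbase
  · rfl
  · simp only [PySem.List.foldl_append_eq_flatMap, List.nil_append, pvChildren,
      List.flatMap_def, List.map_append, List.flatten_append, List.map_map]
    congr 1
    · apply congrArg
      apply List.map_congr_left
      intro i hi
      have hb := PySem.List.mem_pyRange_one.mp hi
      simp only [Function.comp_apply, pvA]
      exact pvGoA_congr list1 list2 n _ _ _ _ _ (by unfold pvM at *; omega) (by unfold pvM at *; omega)
    · apply congrArg
      apply List.map_congr_left
      intro j hj
      have hb := PySem.List.mem_pyRange_one.mp hj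
      simp only [Function.comp_apply, pvA]
      exact pvGoA_congr list1 list2 n _ _ _ _ _ (by unfold pvM at *; omega) (by unfold pvM at *; omega)

-- each state's weight strictly exceeds the total weight of its children
lemma pvChildren_weight_lt (list1 list2 : List Int) (c : List Int) (i1 i2 : Int) :
    ((pvChildren list1 list2 c i1 i2).map (pvStackWeight list1 list2)).sum
      < pvStackWeight list1 list2 (c, i1, i2) := by
  set m := ((list1.length : Int) - i1).toNat + ((list2.length : Int) - i2).toNat with hm
  have h1 : ∀ w ∈ ((PySem.List.pyRange i1 (list1.length : Int) 1).map
      (fun i => pvStackWeight list1 list2 (c ++ [PySem.List.pyGetD list1 i 0], i + 1, i2))),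
      w ≤ Nat.factorial m := by
    intro w hw
    obtain ⟨i, hi, rfl⟩ := List.mem_map.mp hw
    rw [PySem.List.mem_pyRange_one] at hi
    exact Nat.factorial_le (by simp only [pvStackWeight]; omega)
  have h2 : ∀ w ∈ ((PySem.List.pyRange i2 (list2.length : Int) 1).map
      (fun j => pvStackWeight list1 list2 (c ++ [PySem.List.pyGetD list2 j 0], i1, j + 1))),
      w ≤ Nat.factorial m := by
    intro w hw
    obtain ⟨j, hj, rfl⟩ := List.mem_map.mp hw
    rw [PySem.List.mem_pyRange_one] at hj
    exact Nat.factorial_le (by simp only [pvStackWeight]; omega)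
  have s1 := List.sum_le_card_nsmul _ _ h1
  have s2 := List.sum_le_card_nsmul _ _ h2
  simp only [List.length_map, PySem.List.length_pyRange_one, smul_eq_mul] at s1 s2
  have hpos := Nat.factorial_pos m
  simp only [pvChildren, List.map_append, List.sum_append, List.map_map, Function.comp_def]
  have hw : pvStackWeight list1 list2 (c, i1, i2) = Nat.factorial (m + 1) := by
    simp [pvStackWeight, hm]
  rw [hw, Nat.factorial_succ]
  have hsum : ((list1.length : Int) - i1).toNat * Nat.factorial m
      + ((list2.length : Int) - i2).toNat * Nat.factorial m = m * Nat.factorial m := by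
    rw [hm, Nat.add_mul]
  have hlt : m * Nat.factorial m < (m + 1) * Nat.factorial m :=
    (Nat.mul_lt_mul_right hpos).mpr (Nat.lt_succ_self m)
  calc (List.map (fun i => pvStackWeight list1 list2 (c ++ [PySem.List.pyGetD list1 i 0], i + 1, i2))
          (PySem.List.pyRange i1 (list1.length : Int) 1)).sum
        + (List.map (fun j => pvStackWeight list1 list2 (c ++ [PySem.List.pyGetD list2 j 0], i1, j + 1))
          (PySem.List.pyRange i2 (list2.length : Int) 1)).sum
      ≤ ((list1.length : Int) - i1).toNat * Nat.factorial m
        + ((list2.length : Int) - i2).toNat * Nat.factorial m := Nat.add_le_add s1 s2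
    _ = m * Nat.factorial m := hsum
    _ < (m + 1) * Nat.factorial m := hlt

-- invariant of B's DFS loop: given enough fuel it returns the accumulator followed by A's value
-- on each stacked state, in order
lemma pvLoop_eq (list1 list2 : List Int) (n : Int) :
    ∀ (fuel : Nat) (stack : List (List Int × Int × Int)) (results : List (List Int)),
      (stack.map (pvStackWeight list1 list2)).sum ≤ fuel →
      pvLoop list1 list2 n fuel stack results =
        results ++ stack.flatMap (pvA list1 list2 n) := by
  intro fuel
  induction fuel with
  | zero =>
    intro stack results hf
    match stack with
    | [] => simp [pvLoop]
    | (c, i1, i2) :: rest =>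
      exfalso
      have hpos : 0 < pvStackWeight list1 list2 (c, i1, i2) := Nat.factorial_pos _
      simp only [List.map_cons, List.sum_cons] at hf
      omega
  | succ a ih =>
    intro stack results hf
    match stack with
    | [] => simp [pvLoop]
    | (c, i1, i2) :: rest =>
      simp only [List.map_cons, List.sum_cons] at hf
      rw [pvLoop]
      have hflat := pvA_flat list1 list2 n c i1 i2
      have hpos : 0 < pvStackWeight list1 list2 (c, i1, i2) := Nat.factorial_pos _
      split_ifs with hbase
      · rw [if_pos hbase] at hflat
        rw [ih rest (results ++ [c]) (by omega)]
        simp [hflat]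
      · rw [if_neg hbase] at hflat
        have hc := pvChildren_weight_lt list1 list2 c i1 i2
        rw [ih (pvChildren list1 list2 c i1 i2 ++ rest) results
            (by simp only [List.map_append, List.sum_append]; omega)]
        simp [hflat]

-- ===== VERDICT (by name: the statement is the Claim_ definition above) =====
theorem combine_lists_recursive_spec : Claim_equal_combine_lists_recursive := by
  intro list1 list2 length cc index1 index2 _ _
  unfold Spec_combine_lists_recursive combine_lists_recursive_alt combine_lists_recursive
  rw [pvLoop_eq list1 list2 length _ _ _ (by simp)]
  simp only [List.flatMap_cons, List.flatMap_nil, List.append_nil, List.nil_append, pvA]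
  exact pvGoA_congr list1 list2 length _ _ _ _ _ (by unfold pvM; omega) (by unfold pvM; omega)
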